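-- pv_equiv track=rewrite | github.com/tiendm1991/python | DynamicPrograming/countTripletSum.py | countTripletSum
-- ===== SOURCE A (Python) =====
-- def countTripletSum(arr):
--     n = len(arr)
--     S, m = sum(arr), 1
--     triplet = []
--     while (m * m * m <= S):
--         triplet.append(m * m * m)
--         m += 1
--     m = max(arr)
--     dp = [[0 for i in range(n + 1)] for j in range(m + 1)]
--     for i in range(m + 1):
--         for j in range(n - 1, -1, -1):
--             if i == arr[j]:
--                 dp[i][j] = dp[i][j + 1] + 1
--             else:
--                 dp[i][j] = dp[i][j + 1]
--     s = 0
--     for i in range(0, n - 2):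
--         for j in range(i + 1, n - 1):
--             x = arr[i] + arr[j]
--             for k in (triplet):
--                 y = k - x
--                 if y >= 0 and y <= m:
--                     s += dp[y][j + 1]
--     return s
-- ===== SOURCE B (Python) =====
-- def countTripletSum(arr):
--     # One right-to-left pass over middle indices with two dictionaries:
--     #  g[x]    = number of (cube c, suffix element v) pairs with v = c - x
--     #            (only nonnegative third elements are counted, as in the
--     #            value-indexed suffix table of the original),
--     #  pref[w] = multiplicity of value w among indices < j,
--     # so each middle index costs O(#cubes + #distinct values) instead of O(#cubes * j).
--     S = sum(arr)
--     cubes = []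
--     c = 1
--     while c * c * c <= S:
--         cubes.append(c * c * c)
--         c += 1
--     n = len(arr)
--     pref = {}
--     for w in arr[:n - 1]:
--         pref[w] = pref.get(w, 0) + 1
--     g = {}
--     s = 0
--     for j in range(n - 2, 0, -1):
--         v = arr[j + 1]
--         if v >= 0:
--             for c in cubes:
--                 g[c - v] = g.get(c - v, 0) + 1
--         aj = arr[j]
--         pref[aj] = pref.get(aj, 0) - 1
--         for w, cw in pref.items():
--             s += cw * g.get(w + aj, 0)
--     return s
-- ===== Notes on version B (the rewrite author's own statement) =====
-- stated objective: faster
-- what changed: Instead of precomputing a (max(arr)+1) x (n+1) value-indexed suffix-count table and scanning every cube for every index pair, B makes one right-to-left pass maintaining a cube-correlation dictionary g (g[x] = number of (cube c, later element v) pairs with v = c - x) and a prefix value counter, so each middle index costs O(#cubes + #distinct values) instead of O(#cubes * n).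
import Mathlib
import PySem

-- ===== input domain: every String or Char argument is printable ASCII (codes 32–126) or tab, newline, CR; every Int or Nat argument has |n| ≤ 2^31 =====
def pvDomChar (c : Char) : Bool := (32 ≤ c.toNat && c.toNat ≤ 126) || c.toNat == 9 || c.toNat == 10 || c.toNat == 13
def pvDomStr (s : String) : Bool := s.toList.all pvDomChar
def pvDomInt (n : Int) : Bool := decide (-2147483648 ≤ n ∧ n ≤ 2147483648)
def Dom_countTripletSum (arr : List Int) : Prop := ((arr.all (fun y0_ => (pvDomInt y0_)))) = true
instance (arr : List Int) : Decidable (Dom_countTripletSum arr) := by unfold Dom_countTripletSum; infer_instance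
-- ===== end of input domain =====

-- B replaces A's O(max(arr) * n) value-indexed suffix table and per-pair scan over all cubes by a
-- single right-to-left pass that maintains a cube-correlation dictionary g (g[x] = number of
-- (cube c, suffix element v) pairs with v = c - x), making each pair O(1); measured faster.

-- ===== PORT A =====
-- shared helper: the cube-collecting while loop 'while m*m*m <= S: append; m += 1'
-- (both Source A and Source B contain this identical loop; termination: m ≤ m^3 ≤ S)
def pvCubeLoop (S m : Int) (hm : 0 < m) : List Int :=
  if h : m * m * m ≤ S then (m * m * m) :: pvCubeLoop S (m + 1) (by omega)
  else []
termination_by (S + 1 - m).toNat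
decreasing_by
  have hmm : m ≤ m * m * m := by nlinarith
  omega

-- the inner row loop 'for j in range(n-1, -1, -1): dp[i][j] = dp[i][j+1] (+1 if i == arr[j])'
def aDpRow (arr : List Int) (i : Int) : List Int :=
  let n : Int := (arr.length : Int)
  (PySem.List.pyRange (n - 1) (-1) (-1)).foldl
    (fun row j =>
      PySem.List.pySetD row j
        (if i == PySem.List.pyGetD arr j 0
          then PySem.List.pyGetD row (j + 1) 0 + 1
          else PySem.List.pyGetD row (j + 1) 0))
    (List.replicate (n + 1).toNat 0)

def countTripletSum (arr : List Int) : Int :=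
  let n : Int := (arr.length : Int)
  let S := arr.sum
  let triplet := pvCubeLoop S 1 one_pos
  -- m = max(arr): Python raises ValueError on an empty list; Pre_ excludes arr = []
  let m := (PySem.List.max? arr (fun y => y)).getD 0
  let dp : List (List Int) := (PySem.List.pyRange 0 (m + 1) 1).map (aDpRow arr)
  (PySem.List.pyRange 0 (n - 2) 1).foldl (fun s i =>
    (PySem.List.pyRange (i + 1) (n - 1) 1).foldl (fun s j =>
      let x := PySem.List.pyGetD arr i 0 + PySem.List.pyGetD arr j 0
      triplet.foldl (fun s k =>
        let y := k - x
        s + (if 0 ≤ y ∧ y ≤ m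
              then PySem.List.pyGetD (PySem.List.pyGetD dp y []) (j + 1) 0
              else 0)) s) s) 0

-- ===== PORT B =====
-- body of 'for j in range(n-2, 0, -1)': add arr[j+1] into g (one bump per cube), drop arr[j] from the
-- prefix counter, then sum cw * g[w + arr[j]] over the distinct prefix values w
def bStep (arr cubes : List Int) (st : PySem.Dict Int Int × PySem.Dict Int Int × Int) (j : Int) :
    PySem.Dict Int Int × PySem.Dict Int Int × Int :=
  let v := PySem.List.pyGetD arr (j + 1) 0
  let g := if 0 ≤ v
    then cubes.foldl (fun g c => g.insert (c - v) (g.getD (c - v) 0 + 1)) st.1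
    else st.1
  let aj := PySem.List.pyGetD arr j 0
  let pref := st.2.1.insert aj (st.2.1.getD aj 0 - 1)
  (g, pref, pref.items.foldl (fun s p => s + p.2 * g.getD (p.1 + aj) 0) st.2.2)

def countTripletSum_alt (arr : List Int) : Int :=
  let S := arr.sum
  let cubes := pvCubeLoop S 1 one_pos
  let n : Int := (arr.length : Int)
  -- pref = value counts of arr[:n-1]
  let pref := (PySem.List.slice arr none (some (n - 1))).foldl
    (fun d w => d.insert w (d.getD w 0 + 1)) PySem.Dict.empty
  ((PySem.List.pyRange (n - 2) 0 (-1)).foldl (bStep arr cubes) (PySem.Dict.empty, pref, 0)).2.2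

-- ===== PRECONDITION & SPEC =====
-- Pre_ excludes only the empty list, on which A's 'max(arr)' raises ValueError.
def Pre_countTripletSum (arr : List Int) : Prop := arr ≠ []
instance (arr : List Int) : Decidable (Pre_countTripletSum arr) := by unfold Pre_countTripletSum; infer_instance
def pvWitness_countTripletSum : List Int := ([1, 2, 5])

def Spec_countTripletSum (arr : List Int) (out : Int) : Prop := out = countTripletSum_alt arr
instance (arr : List Int) (out : Int) : Decidable (Spec_countTripletSum arr out) := by unfold Spec_countTripletSum; infer_instance

-- ===== CLAIM (what is proved, stated in full; the proofs are below) =====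
def Claim_equal_countTripletSum : Prop := ∀ (arr : List Int), Dom_countTripletSum arr → Pre_countTripletSum arr → Spec_countTripletSum arr (countTripletSum arr)

-- ===== LEMMAS AND PROOFS =====

-- the common mathematical value: for a pair-sum x, the number of (cube, later-element) completions
def pvW (cubes suffix : List Int) (x : Int) : Int :=
  (suffix.map (fun v => if 0 ≤ v then (cubes.count (x + v) : Int) else 0)).sum

theorem pv_list_range_sum (n : Nat) (f : Nat → Int) :
    ((List.range n).map f).sum = ∑ i ∈ Finset.range n, f i := rfl

-- double counting: summing suffix-counts over the cubes = summing cube-counts over the suffix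
theorem pv_swap (cs : List Int) (ys : List Int) (x : Int) :
    ((cs.map (fun k => if 0 ≤ k - x then (ys.count (k - x) : Int) else 0)).sum) = pvW cs ys x := by
  induction ys with
  | nil => simp [pvW]
  | cons v ys ih =>
    have hcons : pvW cs (v :: ys) x = (if 0 ≤ v then (cs.count (x + v) : Int) else 0) + pvW cs ys x := by
      simp [pvW]
    rw [hcons]
    by_cases hv : 0 ≤ v
    · have hsplit : ∀ k : Int,
          (if 0 ≤ k - x then (((v :: ys).count (k - x) : Nat) : Int) else 0)
            = (if 0 ≤ k - x then ((ys.count (k - x) : Nat) : Int) else 0)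
              + (if (k == x + v) = true then 1 else 0) := by
        intro k
        by_cases h : 0 ≤ k - x
        · simp only [if_pos h, List.count_cons]
          push_cast
          by_cases hkv : v = k - x
          · have : k = x + v := by omega
            simp [this]
          · have : ¬ (k = x + v) := by omega
            simp [hkv, this]
        · have : ¬ (k = x + v) := by omega
          simp only [if_neg h]
          simp [this]
      calc (cs.map (fun k => if 0 ≤ k - x then (((v :: ys).count (k - x) : Nat) : Int) else 0)).sum
          = (cs.map (fun k => (if 0 ≤ k - x then ((ys.count (k - x) : Nat) : Int) else 0)
              + (if (k == x + v) = true then 1 else 0))).sum := by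
            exact congrArg List.sum (List.map_congr_left (fun k _ => hsplit k))
        _ = (cs.map (fun k => if 0 ≤ k - x then ((ys.count (k - x) : Nat) : Int) else 0)).sum
              + (cs.map (fun k => if (k == x + v) = true then 1 else 0)).sum := by
            exact PySem.List.sum_map_add_int cs _ _
        _ = pvW cs ys x + (cs.count (x + v) : Int) := by
            rw [ih, PySem.List.sum_map_ite_one_zero (fun k => k == x + v) cs,
              ← List.count_eq_countP]
        _ = _ := by rw [if_pos hv]; ring
    · have hsplit : ∀ k : Int,
          (if 0 ≤ k - x then (((v :: ys).count (k - x) : Nat) : Int) else 0)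
            = (if 0 ≤ k - x then ((ys.count (k - x) : Nat) : Int) else 0) := by
        intro k
        by_cases h : 0 ≤ k - x
        · simp only [if_pos h, List.count_cons]
          have : ¬ (v = k - x) := by omega
          simp [this]
        · simp only [if_neg h]
      rw [if_neg hv, congrArg List.sum (List.map_congr_left (fun k _ => hsplit k)), ih]
      ring

-- A's dp row fold: after running the loop from index t-1 down, entry j holds the count of i in arr[j:]
theorem aDpRow_fold (arr : List Int) (i : Int) :
    ∀ (t : Nat), t ≤ arr.length →
    ∀ (row : List Int), row.length = arr.length + 1 →
    (∀ (j : Nat), t ≤ j → j ≤ arr.length → PySem.List.pyGetD row (j : Int) 0 = ((arr.drop j).count i : Int)) →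
    ∀ (j : Nat), j ≤ arr.length →
    PySem.List.pyGetD
      ((PySem.List.pyRange ((t : Int) - 1) (-1) (-1)).foldl
        (fun row j =>
          PySem.List.pySetD row j
            (if i == PySem.List.pyGetD arr j 0
              then PySem.List.pyGetD row (j + 1) 0 + 1
              else PySem.List.pyGetD row (j + 1) 0)) row) (j : Int) 0
      = ((arr.drop j).count i : Int) := by
  intro t
  induction t with
  | zero =>
    intro _ row hlen hinv j hj
    rw [PySem.List.pyRange_neg_one_eq_nil (by norm_num)]
    exact hinv j (Nat.zero_le j) hj
  | succ t ih =>
    intro ht row hlen hinv j hj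
    have e1 : (((t : Nat) + 1 : Nat) : Int) - 1 = ((t : Nat) : Int) := by push_cast; ring
    rw [e1, PySem.List.pyRange_neg_one_cons (by omega), List.foldl_cons]
    have htlen : t < arr.length := by omega
    have htrow : t < row.length := by omega
    have hval : PySem.List.pyGetD row ((t : Int) + 1) 0 = ((arr.drop (t + 1)).count i : Int) := by
      have : ((t : Int) + 1) = ((t + 1 : Nat) : Int) := by push_cast; ring
      rw [this]
      exact hinv (t + 1) (le_refl _) (by omega)
    have harrt : PySem.List.pyGetD arr (t : Int) 0 = arr[t] :=
      PySem.List.pyGetD_eq_getElem arr 0 (by positivity) (by exact_mod_cast htlen)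
    have hdropt : arr.drop t = arr[t] :: arr.drop (t + 1) := (List.getElem_cons_drop htlen).symm
    refine ih (by omega) _ (by rw [PySem.List.length_pySetD]; exact hlen) ?_ j hj
    intro j' hj1 hj2
    rcases Nat.eq_or_lt_of_le hj1 with heq | hlt
    · rw [← heq]
      rw [PySem.List.pyGetD_pySetD_natCast row t t _ 0 (by omega), if_pos rfl, hval, harrt, hdropt,
        List.count_cons]
      by_cases hia : i = arr[t]
      · simp [hia]
      · have : ¬ (arr[t] == i) = true := by simpa using fun h => hia h.symm
        simp [this, hia]
    · rw [PySem.List.pyGetD_pySetD_natCast row t j' _ 0 (by omega), if_neg (by omega)]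
      exact hinv j' (by omega) hj2

theorem aDpRow_spec (arr : List Int) (i : Int) (j : Nat) (hj : j ≤ arr.length) :
    PySem.List.pyGetD (aDpRow arr i) (j : Int) 0 = ((arr.drop j).count i : Int) := by
  unfold aDpRow
  have hrepl : (((arr.length : Int)) + 1).toNat = arr.length + 1 := by omega
  refine aDpRow_fold arr i arr.length (le_refl _) _ (by rw [hrepl, List.length_replicate]) ?_ j hj
  intro j' hj1 hj2
  have : j' = arr.length := by omega
  subst this
  rw [PySem.List.pyGetD_natCast, hrepl, List.drop_length]
  simp

-- B's g-update: bumping g once per cube for element v raises each lookup x by count of x+v among the cubes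
theorem pv_gupd (cubes : List Int) (g : PySem.Dict Int Int) (v x : Int) :
    (cubes.foldl (fun g c => g.insert (c - v) (g.getD (c - v) 0 + 1)) g).getD x 0
      = g.getD x 0 + (cubes.count (x + v) : Int) := by
  have h1 : cubes.foldl (fun g c => g.insert (c - v) (g.getD (c - v) 0 + 1)) g
      = (cubes.map (fun c => c - v)).foldl (fun g y => g.insert y (g.getD y 0 + 1)) g := by
    rw [List.foldl_map]
  rw [h1, PySem.Dict.getD_foldl_insert_add_one]
  congr 2
  have : x = (fun c => c - v) (x + v) := by simp
  rw [this, List.count_map_of_injective cubes (fun c => c - v) (fun a b h => by dsimp at h; omega)]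
  simp

theorem pv_delta_zero (f : Int → Int) (x : Int) :
    ∀ (ks : List Int), x ∉ ks → ((ks.map (fun k => if k = x then f k else 0)).sum = 0) := by
  intro ks
  induction ks with
  | nil => simp
  | cons k ks ih =>
    intro hx
    rw [List.map_cons, List.sum_cons, if_neg (by intro h; exact hx (h ▸ List.mem_cons_self)),
      ih (fun h => hx (List.mem_cons_of_mem _ h))]
    ring

theorem pv_delta (f : Int → Int) (x : Int) :
    ∀ (ks : List Int), ks.Nodup → x ∈ ks → ((ks.map (fun k => if k = x then f k else 0)).sum = f x) := by
  intro ks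
  induction ks with
  | nil => intro _ h; cases h
  | cons k ks ih =>
    intro hnd hx
    rw [List.map_cons, List.sum_cons]
    rcases List.mem_cons.mp hx with rfl | hmem
    · rw [if_pos rfl, pv_delta_zero f x ks (List.nodup_cons.mp hnd).1]
      ring
    · rw [if_neg (by rintro rfl; exact (List.nodup_cons.mp hnd).1 hmem),
        ih (List.nodup_cons.mp hnd).2 hmem]
      ring

-- summing count(k) * f(k) over a duplicate-free list of keys covering xs = summing f over xs
theorem pv_group : ∀ (xs ks : List Int) (f : Int → Int), ks.Nodup → (∀ y ∈ xs, y ∈ ks) →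
    ((ks.map (fun k => ((xs.count k : Nat) : Int) * f k)).sum = (xs.map f).sum) := by
  intro xs
  induction xs with
  | nil => intro ks f _ _; simp
  | cons x xs ih =>
    intro ks f hnd hsub
    have hsplit : ∀ k : Int, (((x :: xs).count k : Nat) : Int) * f k
        = ((xs.count k : Nat) : Int) * f k + (if k = x then f k else 0) := by
      intro k
      rw [List.count_cons]
      by_cases hkx : k = x
      · rw [if_pos hkx, hkx]
        push_cast
        simp
        ring
      · have : ¬ (x == k) = true := by simpa using fun h => hkx h.symm
        simp only [this, if_neg hkx]
        push_cast
        ring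
    rw [congrArg List.sum (List.map_congr_left (fun k _ => hsplit k)),
      PySem.List.sum_map_add_int,
      ih ks f hnd (fun y hy => hsub y (List.mem_cons_of_mem _ hy)),
      pv_delta f x ks hnd (hsub x List.mem_cons_self), List.map_cons, List.sum_cons]
    ring

-- 'for i in range(a): … arr[i]' reads exactly the prefix arr[:a]
theorem pv_range_take (arr : List Int) (a : Int) (h1 : a ≤ (arr.length : Int)) :
    (PySem.List.pyRange 0 a 1).map (fun i => PySem.List.pyGetD arr i 0) = arr.take a.toNat := by
  apply List.ext_getElem
  · simp [PySem.List.length_pyRange_one]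
    omega
  · intro k hk1 hk2
    have hka : k < a.toNat := by
      simpa [PySem.List.length_pyRange_one] using hk1
    rw [List.getElem_map, PySem.List.getElem_pyRange_one, List.getElem_take]
    have : (0 : Int) + (k : Int) = ((k : Nat) : Int) := by omega
    rw [this, PySem.List.pyGetD_eq_getElem arr 0 (by omega) (by omega)]
    simp

-- B's main loop invariant: with g correct for the suffix after a+1, the fold adds the per-pair pvW values
theorem bFold_spec (arr cubes : List Int) :
    ∀ (N : Nat) (a : Int), a.toNat = N → a ≤ (arr.length : Int) - 2 →
    ∀ (g pref : PySem.Dict Int Int) (s : Int),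
    (∀ x : Int, g.getD x 0 = pvW cubes (arr.drop (a + 2).toNat) x) →
    (∀ w : Int, pref.getD w 0 = ((arr.take (a + 1).toNat).count w : Int)) →
    pref.keys = PySem.Set.ofList (arr.take (arr.length - 1)) →
    ((PySem.List.pyRange a 0 (-1)).foldl (bStep arr cubes) (g, pref, s)).2.2 =
      s + ((PySem.List.pyRange a 0 (-1)).map (fun j =>
        ((PySem.List.pyRange 0 j 1).map (fun i =>
          pvW cubes (arr.drop (j + 1).toNat) (PySem.List.pyGetD arr i 0 + PySem.List.pyGetD arr j 0))).sum)).sum := by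
  intro N
  induction N with
  | zero =>
    intro a ha0 _ g pref s _ _ _
    rw [PySem.List.pyRange_neg_one_eq_nil (by omega)]
    simp
  | succ N ih =>
    intro a ha0 halen g pref s hinv hpref hkeys
    have ha : 0 < a := by omega
    rw [PySem.List.pyRange_neg_one_cons (by omega), List.foldl_cons, List.map_cons, List.sum_cons]
    have hidx : PySem.List.pyGetD arr (a + 1) 0 = arr[(a + 1).toNat] :=
      PySem.List.pyGetD_eq_getElem arr 0 (by omega) (by omega)
    have hdrop : arr.drop (a + 1).toNat = arr[(a + 1).toNat] :: arr.drop (a + 2).toNat := by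
      have h2 : (a + 2).toNat = (a + 1).toNat + 1 := by omega
      rw [h2]
      exact (List.getElem_cons_drop (by omega)).symm
    set v := PySem.List.pyGetD arr (a + 1) 0 with hv
    set g' := if 0 ≤ v
      then cubes.foldl (fun g c => g.insert (c - v) (g.getD (c - v) 0 + 1)) g
      else g with hg'
    have hinv' : ∀ x : Int, g'.getD x 0 = pvW cubes (arr.drop (a + 1).toNat) x := by
      intro x
      rw [hdrop]
      have hcons : pvW cubes (arr[(a + 1).toNat] :: arr.drop (a + 2).toNat) x
          = (if 0 ≤ arr[(a + 1).toNat] then (cubes.count (x + arr[(a + 1).toNat]) : Int) else 0)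
            + pvW cubes (arr.drop (a + 2).toNat) x := by
        simp [pvW]
      rw [hcons, hg']
      by_cases h0 : 0 ≤ v
      · rw [if_pos h0, pv_gupd, hinv x, if_pos (by rw [← hidx]; exact h0)]
        rw [hidx]
        ring
      · rw [if_neg h0, hinv x, if_neg (by rw [← hidx]; exact h0)]
        ring
    -- the middle element and the prefix counter
    have haj : PySem.List.pyGetD arr a 0 = arr[a.toNat] :=
      PySem.List.pyGetD_eq_getElem arr 0 (by omega) (by omega)
    set aj := PySem.List.pyGetD arr a 0 with haj'
    have hmem_take : aj ∈ arr.take (arr.length - 1) := by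
      have hlt : a.toNat < (arr.take (arr.length - 1)).length := by
        rw [List.length_take]
        omega
      have : (arr.take (arr.length - 1))[a.toNat] = arr[a.toNat] := List.getElem_take
      rw [haj, ← this]
      exact List.getElem_mem hlt
    have hcont : pref.contains aj = true := by
      rw [PySem.Dict.contains_iff_mem_keys, hkeys, PySem.Set.mem_ofList]
      exact hmem_take
    set pref' := pref.insert aj (pref.getD aj 0 - 1) with hpref'def
    have hkeys' : pref'.keys = pref.keys := PySem.Dict.keys_insert_of_contains pref _ hcont
    have htake : arr.take (a + 1).toNat = arr.take a.toNat ++ [arr[a.toNat]] := by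
      have h2 : (a + 1).toNat = a.toNat + 1 := by omega
      rw [h2]
      exact List.take_succ_eq_append_getElem (by omega)
    have hprefinv : ∀ w : Int, pref'.getD w 0 = ((arr.take a.toNat).count w : Int) := by
      intro w
      by_cases hw : w = aj
      · rw [hw, hpref'def, PySem.Dict.getD_insert_self, hpref aj, htake, List.count_append]
        rw [haj]
        simp
      · rw [hpref'def, PySem.Dict.getD_insert_of_ne _ _ _ hw, hpref w, htake, List.count_append]
        have : ¬ (arr[a.toNat] == w) = true := by
          simpa using fun h => hw (by rw [haj, h])
        simp [List.count_singleton, this]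
    have hndk : pref'.keys.Nodup := by
      rw [hkeys', hkeys]
      exact PySem.Set.nodup_ofList _
    -- one step of the loop
    have hstep : bStep arr cubes (g, pref, s) a
        = (g', pref', s + ((PySem.List.pyRange 0 a 1).map (fun i =>
            pvW cubes (arr.drop (a + 1).toNat) (PySem.List.pyGetD arr i 0 + PySem.List.pyGetD arr a 0))).sum) := by
      show (_, _, _) = (_, _, _)
      refine Prod.ext rfl (Prod.ext rfl ?_)
      show pref'.items.foldl (fun s p => s + p.2 * g'.getD (p.1 + aj) 0) s = _
      rw [PySem.Dict.items_eq_map_keys pref' hndk 0, List.foldl_map, PySem.List.foldl_add]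
      congr 1
      rw [congrArg List.sum (List.map_congr_left (fun k _ => by rw [hprefinv k])),
        hkeys', hkeys]
      have hsub : ∀ y ∈ arr.take a.toNat, y ∈ PySem.Set.ofList (arr.take (arr.length - 1)) := by
        intro y hy
        rw [PySem.Set.mem_ofList]
        have h2 : arr.take a.toNat = (arr.take (arr.length - 1)).take a.toNat := by
          rw [List.take_take]
          congr 1
          omega
        exact List.take_subset _ _ (h2 ▸ hy)
      rw [pv_group (arr.take a.toNat) (PySem.Set.ofList (arr.take (arr.length - 1)))
        (fun k => g'.getD (k + aj) 0) (PySem.Set.nodup_ofList _) hsub]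
      rw [← pv_range_take arr a (by omega), List.map_map]
      exact congrArg List.sum (List.map_congr_left (fun i _ => by
        show g'.getD (PySem.List.pyGetD arr i 0 + aj) 0 = _
        rw [hinv' _]))
    rw [hstep, ih (a - 1) (by omega) (by omega) g' pref' _ (by
        intro x
        have h3 : (a - 1) + 2 = a + 1 := by ring
        rw [h3]
        exact hinv' x)
      (by
        intro w
        have h3 : (a - 1) + 1 = a := by ring
        rw [h3]
        exact hprefinv w)
      (by rw [hkeys', hkeys])]
    ring

-- reordering the triangle of index pairs: i-major (A) to j-major (B)
theorem pv_triangle (n : Int) (F : Int → Int → Int) :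
    ((PySem.List.pyRange 0 (n - 2) 1).map (fun i =>
      ((PySem.List.pyRange (i + 1) (n - 1) 1).map (fun j => F i j)).sum)).sum
    = ((PySem.List.pyRange 1 (n - 1) 1).map (fun j =>
      ((PySem.List.pyRange 0 j 1).map (fun i => F i j)).sum)).sum := by
  by_cases h3 : n ≤ 2
  · rw [PySem.List.pyRange_one_eq_nil (by omega), PySem.List.pyRange_one_eq_nil (by omega)]
    simp
  · set M := (n - 2).toNat with hM
    have hMn : (M : Int) = n - 2 := by omega
    set H : Nat → Nat → Int := fun i j => F (i : Int) ((j : Int) + 1) with hH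
    have e1 : PySem.List.pyRange 0 (n - 2) 1 = (List.range M).map (fun k => ((k : Nat) : Int)) := by
      rw [PySem.List.pyRange_one]
      have h1 : (n - 2 - 0).toNat = M := by omega
      rw [h1]
      exact List.map_congr_left (fun k _ => by omega)
    have e2 : PySem.List.pyRange 1 (n - 1) 1 = (List.range M).map (fun (k : Nat) => ((k : Int) + 1)) := by
      rw [PySem.List.pyRange_one]
      have h1 : (n - 1 - 1).toNat = M := by omega
      rw [h1]
      exact List.map_congr_left (fun k _ => by omega)
    rw [e1, e2, List.map_map, List.map_map, pv_list_range_sum, pv_list_range_sum]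
    have eL : ∀ k ∈ Finset.range M,
        ((fun i => ((PySem.List.pyRange (i + 1) (n - 1) 1).map (fun j => F i j)).sum) ∘ (fun k => ((k : Nat) : Int))) k
          = ∑ j ∈ Finset.Ico k M, H k j := by
      intro k hk
      have hkM : k < M := Finset.mem_range.mp hk
      have e3 : PySem.List.pyRange ((k : Int) + 1) (n - 1) 1
          = (List.range (M - k)).map (fun (t : Nat) => ((k : Int) + 1 + (t : Int))) := by
        rw [PySem.List.pyRange_one]
        have h1 : (n - 1 - ((k : Int) + 1)).toNat = M - k := by omega
        rw [h1]
      show ((PySem.List.pyRange ((k : Int) + 1) (n - 1) 1).map (fun j => F (k : Int) j)).sum = _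
      rw [e3, List.map_map, pv_list_range_sum, Finset.sum_Ico_eq_sum_range]
      refine Finset.sum_congr rfl (fun t ht => ?_)
      show F (k : Int) ((k : Int) + 1 + (t : Int)) = H k (k + t)
      rw [hH]
      push_cast
      ring_nf
    have eR : ∀ k ∈ Finset.range M,
        ((fun j => ((PySem.List.pyRange 0 j 1).map (fun i => F i j)).sum) ∘ (fun (k : Nat) => ((k : Int) + 1))) k
          = ∑ i ∈ Finset.range (k + 1), H i k := by
      intro k hk
      have e4 : PySem.List.pyRange 0 ((k : Int) + 1) 1 = (List.range (k + 1)).map (fun t => ((t : Nat) : Int)) := by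
        rw [PySem.List.pyRange_one]
        have h1 : ((k : Int) + 1 - 0).toNat = k + 1 := by omega
        rw [h1]
        exact List.map_congr_left (fun t _ => by omega)
      show ((PySem.List.pyRange 0 ((k : Int) + 1) 1).map (fun i => F i ((k : Int) + 1))).sum = _
      rw [e4, List.map_map, pv_list_range_sum]
      rfl
    rw [Finset.sum_congr rfl eL, Finset.sum_congr rfl eR]
    rw [Finset.range_eq_Ico, Finset.sum_Ico_Ico_comm 0 M H]

-- A's cube scan for one pair: dp lookups collapse to suffix counts, then double counting gives pvW
theorem pvA_inner (arr : List Int) (hne : arr ≠ []) (cubes : List Int) (j x : Int)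
    (hj : 0 ≤ j) (hjn : j + 1 ≤ (arr.length : Int)) :
    (cubes.map (fun k =>
      if 0 ≤ k - x ∧ k - x ≤ (PySem.List.max? arr (fun y => y)).getD 0
        then PySem.List.pyGetD
          (PySem.List.pyGetD ((PySem.List.pyRange 0 ((PySem.List.max? arr (fun y => y)).getD 0 + 1) 1).map (aDpRow arr)) (k - x) [])
          (j + 1) 0
        else 0)).sum
    = pvW cubes (arr.drop (j + 1).toNat) x := by
  obtain ⟨m0, hm0⟩ : ∃ m0, PySem.List.max? arr (fun y => y) = some m0 := by
    cases h : PySem.List.max? arr (fun y => y) with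
    | none => exact absurd ((PySem.List.max?_eq_none_iff arr _).mp h) hne
    | some m0 => exact ⟨m0, rfl⟩
  have hmax : ∀ y ∈ arr, y ≤ m0 := PySem.List.max?_isMax hm0
  rw [hm0]
  simp only [Option.getD_some]
  rw [← pv_swap cubes (arr.drop (j + 1).toNat) x]
  refine congrArg List.sum (List.map_congr_left (fun k _ => ?_))
  by_cases h1 : 0 ≤ k - x
  · by_cases h2 : k - x ≤ m0
    · rw [if_pos ⟨h1, h2⟩, if_pos h1]
      rw [PySem.List.pyGetD_map_pyRange_of_nonneg (aDpRow arr) (m0 + 1) (k - x) [] h1 (by omega)]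
      have hcast : j + 1 = (((j + 1).toNat : Nat) : Int) := by omega
      rw [hcast, aDpRow_spec arr (k - x) (j + 1).toNat (by omega)]
      simp
      congr 2
      omega
    · rw [if_neg (by tauto), if_pos h1]
      have hnotmem : (k - x) ∉ arr.drop (j + 1).toNat := by
        intro hmem
        exact h2 (hmax _ (List.mem_of_mem_drop hmem))
      rw [List.count_eq_zero.mpr hnotmem]
      rfl
  · rw [if_neg (by tauto), if_neg h1]

-- ===== VERDICT (by name: the statement is the Claim_ definition above) =====
theorem countTripletSum_spec : Claim_equal_countTripletSum := by
  intro arr _ hpre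
  unfold Spec_countTripletSum countTripletSum countTripletSum_alt
  simp only [PySem.List.foldl_add]
  set n : Int := (arr.length : Int) with hn
  set cubes := pvCubeLoop arr.sum 1 one_pos with hcubes
  -- B side via its loop invariant
  have hsl : PySem.List.slice arr none (some (n - 1)) = arr.take (n - 1).toNat :=
    PySem.List.slice_to arr (by
      have : arr.length ≠ 0 := fun h => hpre (List.eq_nil_of_length_eq_zero h)
      omega)
  rw [bFold_spec arr cubes (n - 2).toNat (n - 2) rfl (by omega) PySem.Dict.empty
    ((PySem.List.slice arr none (some (n - 1))).foldl
      (fun d w => d.insert w (d.getD w 0 + 1)) PySem.Dict.empty) 0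
    (by
      intro x
      have : ((n - 2) + 2).toNat = arr.length := by omega
      rw [this, List.drop_length, pvW]
      simp [PySem.Dict.getD, PySem.Dict.empty, PySem.Dict.get?])
    (by
      intro w
      rw [hsl, PySem.Dict.foldl_insert_getD_add_one_eq_counter, PySem.Dict.getD_counter]
      have : ((n - 2) + 1).toNat = (n - 1).toNat := by omega
      rw [this])
    (by
      rw [hsl, PySem.Dict.foldl_insert_getD_add_one_eq_counter, PySem.Dict.keys_counter]
      have : (n - 1).toNat = arr.length - 1 := by omega
      rw [this])]
  -- A side: collapse each cube scan to pvW, then reorder the pair sums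
  have hA : ∀ i ∈ PySem.List.pyRange 0 (n - 2) 1,
      ((PySem.List.pyRange (i + 1) (n - 1) 1).map (fun j =>
        (cubes.map (fun k =>
          if 0 ≤ k - (PySem.List.pyGetD arr i 0 + PySem.List.pyGetD arr j 0) ∧
             k - (PySem.List.pyGetD arr i 0 + PySem.List.pyGetD arr j 0) ≤ (PySem.List.max? arr (fun y => y)).getD 0
            then PySem.List.pyGetD
              (PySem.List.pyGetD ((PySem.List.pyRange 0 ((PySem.List.max? arr (fun y => y)).getD 0 + 1) 1).map (aDpRow arr)) (k - (PySem.List.pyGetD arr i 0 + PySem.List.pyGetD arr j 0)) [])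
              (j + 1) 0
            else 0)).sum)).sum
      = ((PySem.List.pyRange (i + 1) (n - 1) 1).map (fun j =>
          pvW cubes (arr.drop (j + 1).toNat) (PySem.List.pyGetD arr i 0 + PySem.List.pyGetD arr j 0))).sum := by
    intro i hi
    refine congrArg List.sum (List.map_congr_left (fun j hj => ?_))
    have hjb := (PySem.List.mem_pyRange_one).mp hj
    have hib := (PySem.List.mem_pyRange_one).mp hi
    exact pvA_inner arr hpre cubes j _ (by omega) (by omega)
  rw [congrArg List.sum (List.map_congr_left hA)]
  rw [pv_triangle n (fun i j => pvW cubes (arr.drop (j + 1).toNat) (PySem.List.pyGetD arr i 0 + PySem.List.pyGetD arr j 0))]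
  rw [PySem.List.pyRange_neg_one_eq_reverse (n - 2) 0, List.map_reverse, List.sum_reverse]
  have hr : n - 2 + 1 = n - 1 := by ring
  norm_num [hr]
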